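-- pv_equiv track=rewrite | github.com/SergNest/Tuto | get_phone_numbers_for_countries.py | get_phone_numbers_for_countries
-- ===== SOURCE A (Python) =====
-- def sanitize_phone_number(phone):
--     new_phone = (
--         phone.strip()
--         .removeprefix("+")
--         .replace("(", "")
--         .replace(")", "")
--         .replace("-", "")
--         .replace(" ", "")
--     )
--     return new_phone
--
-- def get_phone_numbers_for_countries(list_phones):
--
--     country_code = {"UA": '380',
--                     "JP": '81',
--                     "TW": '886',
--                     "SG": '65'}
--
--     return_code = {"UA": [],
--                 "JP": [],
--                 "TW": [],
--                 "SG": []}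
--
--     for phone in list_phones:
--        new_phone = sanitize_phone_number(phone)
--        for code in country_code:
--         check = new_phone.removeprefix(country_code.get(code))
--         if len(check) != len(new_phone):
--            return_code[code].append(new_phone)
--            break
--        else:
--         return_code['UA'].append(new_phone)
--     return return_code
-- ===== SOURCE B (Python) =====
-- def sanitize_phone_number(phone):
--     new_phone = (
--         phone.strip()
--         .removeprefix("+")
--         .replace("(", "")
--         .replace(")", "")
--         .replace("-", "")
--         .replace(" ", "")
--     )
--     return new_phone
--
-- def get_phone_numbers_for_countries(list_phones):
--     sanitized = [sanitize_phone_number(p) for p in list_phones]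
--     return {
--         "UA": [p for p in sanitized if not p.startswith(("81", "886", "65"))],
--         "JP": [p for p in sanitized if p.startswith("81")],
--         "TW": [p for p in sanitized if p.startswith("886")],
--         "SG": [p for p in sanitized if p.startswith("65")],
--     }
-- ===== Notes on version B (the rewrite author's own statement) =====
-- stated objective: simpler
-- what changed: A's single pass with an inner for/else-break loop over the country-code dict is replaced by sanitizing once and building each bucket with an independent per-country filter (UA as the complement of the disjoint foreign prefixes).
import Mathlib
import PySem

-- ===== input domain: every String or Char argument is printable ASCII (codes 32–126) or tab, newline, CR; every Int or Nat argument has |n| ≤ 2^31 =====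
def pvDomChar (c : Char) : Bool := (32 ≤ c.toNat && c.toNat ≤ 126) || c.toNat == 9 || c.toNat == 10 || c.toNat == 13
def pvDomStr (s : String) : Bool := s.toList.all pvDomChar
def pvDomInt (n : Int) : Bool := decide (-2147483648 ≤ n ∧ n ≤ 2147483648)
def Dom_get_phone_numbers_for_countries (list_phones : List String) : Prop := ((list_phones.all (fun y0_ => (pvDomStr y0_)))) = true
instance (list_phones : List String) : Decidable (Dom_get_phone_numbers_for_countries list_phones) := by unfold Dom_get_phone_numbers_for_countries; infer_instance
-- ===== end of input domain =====

-- B sanitizes all phones once and builds each country's bucket with an independent filter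
-- (UA as the complement of the disjoint foreign prefixes), replacing A's single pass with an
-- inner for/else-break loop over the country-code dict; objective: simpler.


-- ===== PORT A =====
-- str.removeprefix (not in PySem): exact — drop the prefix iff the string starts with it
def pyRemoveprefix (s p : String) : String :=
  if PySem.Str.startswith s p then String.ofList (s.toList.drop p.toList.length) else s

-- shared module helper (identical source in Source A and Source B)
def sanitize_phone_number (phone : String) : String :=
  PySem.Str.replace (PySem.Str.replace (PySem.Str.replace (PySem.Str.replace
    (pyRemoveprefix (PySem.Str.strip phone) "+") "(" "") ")" "") "-" "") " " ""

def pvCountryCode : PySem.Dict String String :=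
  PySem.Dict.ofList [("UA", "380"), ("JP", "81"), ("TW", "886"), ("SG", "65")]

-- the inner 'for code in country_code: … break / else' loop: the first matching code, if any
-- (country_code.get(code) always hits since code ranges over the keys; "" stands in for Python's None)
def pvMatchCode (new_phone : String) : List String → Option String
  | [] => none
  | code :: rest =>
      let check := pyRemoveprefix new_phone (pvCountryCode.getD code "")
      if PySem.Str.len check ≠ PySem.Str.len new_phone then some code
      else pvMatchCode new_phone rest

def get_phone_numbers_for_countries (list_phones : List String) : List (String × List String) :=
  let return_code : PySem.Dict String (List String) :=
    PySem.Dict.ofList [("UA", []), ("JP", []), ("TW", []), ("SG", [])]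
  (list_phones.foldl (fun d phone =>
      let new_phone := sanitize_phone_number phone
      match pvMatchCode new_phone pvCountryCode.keys with
      | some code => d.modify code [] (fun l => l ++ [new_phone])
      | none => d.modify "UA" [] (fun l => l ++ [new_phone])) return_code).items

-- ===== PORT B =====
def get_phone_numbers_for_countries_alt (list_phones : List String) : List (String × List String) :=
  let sanitized := list_phones.map sanitize_phone_number
  [("UA", sanitized.filter (fun p => !(PySem.Str.startswith p "81" || PySem.Str.startswith p "886" || PySem.Str.startswith p "65"))),
   ("JP", sanitized.filter (fun p => PySem.Str.startswith p "81")),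
   ("TW", sanitized.filter (fun p => PySem.Str.startswith p "886")),
   ("SG", sanitized.filter (fun p => PySem.Str.startswith p "65"))]

-- ===== PRECONDITION & SPEC =====
def Spec_get_phone_numbers_for_countries (list_phones : List String) (out : List (String × List String)) : Prop := out = get_phone_numbers_for_countries_alt list_phones
instance (list_phones : List String) (out : List (String × List String)) : Decidable (Spec_get_phone_numbers_for_countries list_phones out) := by unfold Spec_get_phone_numbers_for_countries; infer_instance

-- ===== CLAIM (what is proved, stated in full; the proofs are below) =====
def Claim_equal_get_phone_numbers_for_countries : Prop := ∀ (list_phones : List String), Dom_get_phone_numbers_for_countries list_phones → Spec_get_phone_numbers_for_countries list_phones (get_phone_numbers_for_countries list_phones)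

-- ===== LEMMAS AND PROOFS =====

-- len(new_phone.removeprefix(p)) != len(new_phone) is exactly new_phone.startswith(p) (p nonempty)
lemma rp_len (np p : String) (hp : p.toList ≠ []) :
    (PySem.Str.len (pyRemoveprefix np p) ≠ PySem.Str.len np) ↔ PySem.Str.startswith np p = true := by
  unfold pyRemoveprefix
  by_cases h : PySem.Str.startswith np p = true
  · rw [if_pos h]
    have hpre : p.toList <+: np.toList := (PySem.Chars.startswith_iff _ _).1 (by simpa using h)
    have hl := hpre.length_le
    have hp0 : 0 < p.toList.length := List.length_pos_iff.2 hp
    simp only [PySem.Str.len_eq, String.toList_ofList, List.length_drop]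
    constructor
    · intro _; exact h
    · intro _; omega
  · rw [if_neg h]
    constructor
    · intro hne; exact absurd rfl hne
    · intro hs; exact absurd hs h

lemma cc_keys : pvCountryCode.keys = ["UA", "JP", "TW", "SG"] := by decide
lemma cc1 : pvCountryCode.getD "UA" "" = "380" := by decide
lemma cc2 : pvCountryCode.getD "JP" "" = "81" := by decide
lemma cc3 : pvCountryCode.getD "TW" "" = "886" := by decide
lemma cc4 : pvCountryCode.getD "SG" "" = "65" := by decide

-- the inner for/else-break loop classifies new_phone by the first matching prefix
lemma match_eq (np : String) :
    pvMatchCode np ["UA", "JP", "TW", "SG"] =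
      if PySem.Str.startswith np "380" then some "UA"
      else if PySem.Str.startswith np "81" then some "JP"
      else if PySem.Str.startswith np "886" then some "TW"
      else if PySem.Str.startswith np "65" then some "SG"
      else none := by
  have e1 : (PySem.Str.len (pyRemoveprefix np "380") ≠ PySem.Str.len np) = (PySem.Str.startswith np "380" = true) := propext (rp_len np "380" (by decide))
  have e2 : (PySem.Str.len (pyRemoveprefix np "81") ≠ PySem.Str.len np) = (PySem.Str.startswith np "81" = true) := propext (rp_len np "81" (by decide))
  have e3 : (PySem.Str.len (pyRemoveprefix np "886") ≠ PySem.Str.len np) = (PySem.Str.startswith np "886" = true) := propext (rp_len np "886" (by decide))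
  have e4 : (PySem.Str.len (pyRemoveprefix np "65") ≠ PySem.Str.len np) = (PySem.Str.startswith np "65" = true) := propext (rp_len np "65" (by decide))
  simp only [pvMatchCode, cc1, cc2, cc3, cc4]
  simp only [e1, e2, e3, e4]

-- the four country prefixes are pairwise non-overlapping
lemma sw380_not (np : String) (h : PySem.Str.startswith np "380" = true) :
    PySem.Str.startswith np "81" = false ∧ PySem.Str.startswith np "886" = false ∧
    PySem.Str.startswith np "65" = false := by
  obtain ⟨t, ht⟩ := (PySem.Chars.startswith_iff _ _).1 (by simpa using h)
  refine ⟨?_, ?_, ?_⟩ <;>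
  · rw [Bool.eq_false_iff]
    intro hq
    have := (PySem.Chars.startswith_iff _ _).1 (by simpa using hq)
    rw [← ht] at this
    simp [List.cons_prefix_cons] at this

lemma sw81_not (np : String) (h : PySem.Str.startswith np "81" = true) :
    PySem.Str.startswith np "886" = false ∧ PySem.Str.startswith np "65" = false := by
  obtain ⟨t, ht⟩ := (PySem.Chars.startswith_iff _ _).1 (by simpa using h)
  refine ⟨?_, ?_⟩ <;>
  · rw [Bool.eq_false_iff]
    intro hq
    have := (PySem.Chars.startswith_iff _ _).1 (by simpa using hq)
    rw [← ht] at this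
    simp [List.cons_prefix_cons] at this

lemma sw886_not (np : String) (h : PySem.Str.startswith np "886" = true) :
    PySem.Str.startswith np "81" = false ∧ PySem.Str.startswith np "65" = false := by
  obtain ⟨t, ht⟩ := (PySem.Chars.startswith_iff _ _).1 (by simpa using h)
  refine ⟨?_, ?_⟩ <;>
  · rw [Bool.eq_false_iff]
    intro hq
    have := (PySem.Chars.startswith_iff _ _).1 (by simpa using hq)
    rw [← ht] at this
    simp [List.cons_prefix_cons] at this

lemma sw65_not (np : String) (h : PySem.Str.startswith np "65" = true) :
    PySem.Str.startswith np "81" = false ∧ PySem.Str.startswith np "886" = false := by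
  obtain ⟨t, ht⟩ := (PySem.Chars.startswith_iff _ _).1 (by simpa using h)
  refine ⟨?_, ?_⟩ <;>
  · rw [Bool.eq_false_iff]
    intro hq
    have := (PySem.Chars.startswith_iff _ _).1 (by simpa using hq)
    rw [← ht] at this
    simp [List.cons_prefix_cons] at this

-- Dict.modify on the concrete four-bucket dict touches exactly the named bucket
lemma mUA (ua jp tw sg : List String) (f : List String → List String) :
    (PySem.Dict.mk [("UA", ua), ("JP", jp), ("TW", tw), ("SG", sg)]).modify "UA" [] f
    = PySem.Dict.mk [("UA", f ua), ("JP", jp), ("TW", tw), ("SG", sg)] := rfl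
lemma mJP (ua jp tw sg : List String) (f : List String → List String) :
    (PySem.Dict.mk [("UA", ua), ("JP", jp), ("TW", tw), ("SG", sg)]).modify "JP" [] f
    = PySem.Dict.mk [("UA", ua), ("JP", f jp), ("TW", tw), ("SG", sg)] := rfl
lemma mTW (ua jp tw sg : List String) (f : List String → List String) :
    (PySem.Dict.mk [("UA", ua), ("JP", jp), ("TW", tw), ("SG", sg)]).modify "TW" [] f
    = PySem.Dict.mk [("UA", ua), ("JP", jp), ("TW", f tw), ("SG", sg)] := rfl
lemma mSG (ua jp tw sg : List String) (f : List String → List String) :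
    (PySem.Dict.mk [("UA", ua), ("JP", jp), ("TW", tw), ("SG", sg)]).modify "SG" [] f
    = PySem.Dict.mk [("UA", ua), ("JP", jp), ("TW", tw), ("SG", f sg)] := rfl

-- invariant of A's main loop: each bucket is its start value plus the per-country filter of the rest
lemma loop_items (ps : List String) (ua jp tw sg : List String) :
    (ps.foldl (fun d phone =>
        let new_phone := sanitize_phone_number phone
        match pvMatchCode new_phone pvCountryCode.keys with
        | some code => d.modify code [] (fun l => l ++ [new_phone])
        | none => d.modify "UA" [] (fun l => l ++ [new_phone]))
      (PySem.Dict.mk [("UA", ua), ("JP", jp), ("TW", tw), ("SG", sg)])).items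
    = [("UA", ua ++ (ps.map sanitize_phone_number).filter (fun p => !(PySem.Str.startswith p "81" || PySem.Str.startswith p "886" || PySem.Str.startswith p "65"))),
       ("JP", jp ++ (ps.map sanitize_phone_number).filter (fun p => PySem.Str.startswith p "81")),
       ("TW", tw ++ (ps.map sanitize_phone_number).filter (fun p => PySem.Str.startswith p "886")),
       ("SG", sg ++ (ps.map sanitize_phone_number).filter (fun p => PySem.Str.startswith p "65"))] := by
  induction ps generalizing ua jp tw sg with
  | nil => simp
  | cons p ps ih =>
    rw [List.foldl_cons]
    by_cases h380 : PySem.Str.startswith (sanitize_phone_number p) "380" = true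
    · obtain ⟨n81, n886, n65⟩ := sw380_not _ h380
      have hm : pvMatchCode (sanitize_phone_number p) pvCountryCode.keys = some "UA" := by
        rw [cc_keys, match_eq, if_pos h380]
      simp only [hm]
      rw [mUA, ih]
      simp only [List.map_cons, List.filter_cons, n81, n886, n65]
      simp
    · by_cases h81 : PySem.Str.startswith (sanitize_phone_number p) "81" = true
      · obtain ⟨n886, n65⟩ := sw81_not _ h81
        have hm : pvMatchCode (sanitize_phone_number p) pvCountryCode.keys = some "JP" := by
          rw [cc_keys, match_eq, if_neg h380, if_pos h81]
        simp only [hm]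
        rw [mJP, ih]
        simp only [List.map_cons, List.filter_cons, h81, n886, n65]
        simp
      · by_cases h886 : PySem.Str.startswith (sanitize_phone_number p) "886" = true
        · obtain ⟨n81, n65⟩ := sw886_not _ h886
          have hm : pvMatchCode (sanitize_phone_number p) pvCountryCode.keys = some "TW" := by
            rw [cc_keys, match_eq, if_neg h380, if_neg h81, if_pos h886]
          simp only [hm]
          rw [mTW, ih]
          simp only [List.map_cons, List.filter_cons, h886, n81, n65]
          simp
        · by_cases h65 : PySem.Str.startswith (sanitize_phone_number p) "65" = true
          · obtain ⟨n81, n886⟩ := sw65_not _ h65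
            have hm : pvMatchCode (sanitize_phone_number p) pvCountryCode.keys = some "SG" := by
              rw [cc_keys, match_eq, if_neg h380, if_neg h81, if_neg h886, if_pos h65]
            simp only [hm]
            rw [mSG, ih]
            simp only [List.map_cons, List.filter_cons, h65, n81, n886]
            simp
          · have hm : pvMatchCode (sanitize_phone_number p) pvCountryCode.keys = none := by
              rw [cc_keys, match_eq, if_neg h380, if_neg h81, if_neg h886, if_neg h65]
            simp only [hm]
            rw [mUA, ih]
            simp only [List.map_cons, List.filter_cons, Bool.eq_false_iff.2 h81,
              Bool.eq_false_iff.2 h886, Bool.eq_false_iff.2 h65]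
            simp

-- ===== VERDICT (by name: the statement is the Claim_ definition above) =====
theorem get_phone_numbers_for_countries_spec : Claim_equal_get_phone_numbers_for_countries := by
  intro list_phones _
  show get_phone_numbers_for_countries list_phones = get_phone_numbers_for_countries_alt list_phones
  unfold get_phone_numbers_for_countries get_phone_numbers_for_countries_alt
  have : PySem.Dict.ofList [("UA", ([] : List String)), ("JP", []), ("TW", []), ("SG", [])]
       = PySem.Dict.mk [("UA", []), ("JP", []), ("TW", []), ("SG", [])] := rfl
  rw [this, loop_items]
  simp
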